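-- pv_equiv track=rewrite | github.com/kingerson/project-vera | tools/general_tools.py | peaks_labeler
-- ===== SOURCE A (Python) =====
-- def peaks_labeler(series):
--     """Crea una lista de etiquetas para ser usada en la gráfica de modo
--     que solo se reflejen los puntos que son picos"""
--     peaks = [None] * len(series)
--     peaks[0] = series[0]
--     peaks[-1] = series[-1]
--     for i in range(1, len(series)-1):
--         if series[i] > series[i-1] and series[i] > series[i+1]:
--             peaks[i] = series[i]
--     return peaks
-- ===== SOURCE B (Python) =====
-- def peaks_labeler(series):
--     """Crea una lista de etiquetas para ser usada en la grafica de modo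
--     que solo se reflejen los puntos que son picos"""
--     first, last = series[0], series[-1]
--     diffs = [b - a for a, b in zip(series, series[1:])]
--     inner = [x if up > 0 > down else None
--              for up, down, x in zip(diffs, diffs[1:], series[1:])]
--     if len(series) == 1:
--         return [first]
--     return [first] + inner + [last]
-- ===== Notes on version B (the rewrite author's own statement) =====
-- stated objective: alternative
-- what changed: Instead of mutating a preallocated None list at indices where an element beats both neighbours, B first builds a first-difference (derivative) table and then labels interior points by scanning that table for a +/- sign change, assembling the result by concatenation around the endpoints.
import Mathlib
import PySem

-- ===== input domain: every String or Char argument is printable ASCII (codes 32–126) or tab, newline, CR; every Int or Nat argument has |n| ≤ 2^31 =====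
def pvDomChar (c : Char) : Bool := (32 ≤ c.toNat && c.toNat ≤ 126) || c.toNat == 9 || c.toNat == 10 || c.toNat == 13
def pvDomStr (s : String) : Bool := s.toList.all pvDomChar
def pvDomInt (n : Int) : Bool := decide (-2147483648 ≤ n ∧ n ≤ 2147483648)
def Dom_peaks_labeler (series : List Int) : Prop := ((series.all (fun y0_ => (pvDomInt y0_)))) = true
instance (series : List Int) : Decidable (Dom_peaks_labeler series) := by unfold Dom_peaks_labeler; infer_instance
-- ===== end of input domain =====

-- B precomputes a first-difference (derivative) table and labels interior points by a +/- sign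
-- change in that table, assembling the output by concatenation around the endpoints (objective: alternative).
-- ===== PORT A =====
-- loop body of A's for-loop (peaks[i] = series[i] when series[i] beats both neighbours)
def pvStepA (series : List Int) (pk : List (Option Int)) (i : Int) : List (Option Int) :=
  if PySem.List.pyGetD series i 0 > PySem.List.pyGetD series (i - 1) 0 ∧
     PySem.List.pyGetD series i 0 > PySem.List.pyGetD series (i + 1) 0
  then pk.set i.toNat (some (PySem.List.pyGetD series i 0)) else pk


def peaks_labeler (series : List Int) : List (Option Int) :=
  let n := series.length
  let peaks := List.replicate n (none : Option Int)
  let peaks := peaks.set 0 (some (PySem.List.pyGetD series 0 0))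
  let peaks := peaks.set (n - 1) (some (PySem.List.pyGetD series (-1) 0))
  (PySem.List.pyRange 1 ((n : Int) - 1) 1).foldl (pvStepA series) peaks


-- ===== PORT B =====
def peaks_labeler_alt (series : List Int) : List (Option Int) :=
  let first := PySem.List.pyGetD series 0 0
  let last := PySem.List.pyGetD series (-1) 0
  let diffs := (series.zip (PySem.List.slice series (some 1) none)).map (fun p => p.2 - p.1)
  let inner := ((diffs.zip (PySem.List.slice diffs (some 1) none)).zip
                (PySem.List.slice series (some 1) none)).map
    (fun p => if p.1.1 > 0 ∧ 0 > p.1.2 then some p.2 else none)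
  if series.length = 1 then [some first] else [some first] ++ inner ++ [some last]


-- ===== PRECONDITION & SPEC =====
-- A raises IndexError on the empty list (peaks[0] = series[0]); B raises there too (series[0]).
def Pre_peaks_labeler (series : List Int) : Prop := series ≠ []
instance (series : List Int) : Decidable (Pre_peaks_labeler series) := by
  unfold Pre_peaks_labeler; infer_instance

def pvWitness_peaks_labeler : List Int := [1, 3, 2]

def Spec_peaks_labeler (series : List Int) (out : List (Option Int)) : Prop := out = peaks_labeler_alt series
instance (series : List Int) (out : List (Option Int)) : Decidable (Spec_peaks_labeler series out) := by unfold Spec_peaks_labeler; infer_instance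

-- ===== CLAIM (what is proved, stated in full; the proofs are below) =====
def Claim_equal_peaks_labeler : Prop := ∀ (series : List Int), Dom_peaks_labeler series → Pre_peaks_labeler series → Spec_peaks_labeler series (peaks_labeler series)

-- ===== LEMMAS AND PROOFS =====
theorem pvStepA_length (series : List Int) (pk : List (Option Int)) (i : Int) :
    (pvStepA series pk i).length = pk.length := by
  unfold pvStepA; split <;> simp


theorem foldl_stepA_getElem? (series : List Int) :
    ∀ (m : Nat) (a : Int) (pk : List (Option Int)) (j : Nat), 1 ≤ a →
    (((PySem.List.pyRange a (a + (m : Int)) 1).foldl (pvStepA series) pk)[j]? =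
      if a ≤ (j : Int) ∧ (j : Int) < a + m ∧
         PySem.List.pyGetD series j 0 > PySem.List.pyGetD series ((j : Int) - 1) 0 ∧
         PySem.List.pyGetD series j 0 > PySem.List.pyGetD series ((j : Int) + 1) 0
      then (if j < pk.length then some (some (PySem.List.pyGetD series j 0)) else none)
      else pk[j]?) := by
  intro m
  induction m with
  | zero =>
    intro a pk j ha
    rw [PySem.List.pyRange_one_eq_nil (by push_cast; omega)]
    rw [if_neg (by push_cast; rintro ⟨h1, h2, -⟩; omega)]
    rfl
  | succ m ih =>
    intro a pk j ha
    rw [PySem.List.pyRange_one_cons (by push_cast; omega), List.foldl_cons,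
        show a + ((m + 1 : Nat) : Int) = (a + 1) + (m : Int) by push_cast; ring,
        ih (a + 1) (pvStepA series pk a) j (by omega)]
    by_cases hja : (j : Int) = a
    · rw [if_neg (fun h => by omega)]
      rw [← hja]
      rw [if_congr (show ((j:Int) ≤ (j:Int) ∧ (j:Int) < (j:Int) + 1 + (m : Int) ∧
            PySem.List.pyGetD series j 0 > PySem.List.pyGetD series ((j : Int) - 1) 0 ∧
            PySem.List.pyGetD series j 0 > PySem.List.pyGetD series ((j : Int) + 1) 0) ↔
            (PySem.List.pyGetD series j 0 > PySem.List.pyGetD series ((j : Int) - 1) 0 ∧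
            PySem.List.pyGetD series j 0 > PySem.List.pyGetD series ((j : Int) + 1) 0) by
          constructor
          · rintro ⟨-, -, h⟩; exact h
          · intro h; exact ⟨le_refl _, by omega, h⟩) rfl rfl]
      unfold pvStepA
      split
      · rw [Int.toNat_natCast, List.getElem?_set, if_pos rfl]
      · rfl
    · have hlen : (pvStepA series pk a).length = pk.length := pvStepA_length ..
      have hget : (pvStepA series pk a)[j]? = pk[j]? := by
        unfold pvStepA; split
        · rw [List.getElem?_set_ne (by omega)]
        · rfl
      rw [hlen, hget]
      rw [if_congr (show (a + 1 ≤ (j:Int) ∧ (j:Int) < a + 1 + (m:Int) ∧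
            PySem.List.pyGetD series j 0 > PySem.List.pyGetD series ((j : Int) - 1) 0 ∧
            PySem.List.pyGetD series j 0 > PySem.List.pyGetD series ((j : Int) + 1) 0) ↔
            (a ≤ (j:Int) ∧ (j:Int) < a + 1 + (m:Int) ∧
            PySem.List.pyGetD series j 0 > PySem.List.pyGetD series ((j : Int) - 1) 0 ∧
            PySem.List.pyGetD series j 0 > PySem.List.pyGetD series ((j : Int) + 1) 0) by
          constructor <;> rintro ⟨h1, h2, h3⟩ <;> exact ⟨by omega, h2, h3⟩) rfl rfl]

theorem peaks_labeler_eq_alt (series : List Int) (hpre : series ≠ []) :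
    peaks_labeler series = peaks_labeler_alt series := by
  unfold peaks_labeler peaks_labeler_alt
  by_cases h1 : series.length = 1
  · obtain ⟨x, rfl⟩ : ∃ x, series = [x] := by
      match series, h1 with
      | [x], _ => exact ⟨x, rfl⟩
    simp [PySem.List.pyRange_one_eq_nil, PySem.List.pyGetD, PySem.List.pyGet?, PySem.List.pyIdx?]
  · have h2 : 2 ≤ series.length := by
      cases series with
      | nil => exact absurd rfl hpre
      | cons a t => simp only [List.length_cons] at h1 ⊢; omega
    set n := series.length with hn
    simp only [if_neg h1]
    -- slices
    rw [PySem.List.slice_from series (a := 1) (by norm_num)]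
    set diffs := (series.zip (series.drop (1:Int).toNat)).map (fun p : Int × Int => p.2 - p.1) with hdiffs
    have hdl : diffs.length = n - 1 := by simp [hdiffs]; omega
    rw [PySem.List.slice_from diffs (a := 1) (by norm_num)]
    simp only [Int.toNat_one]
    have hde : ∀ (k : Nat) (hk : k < n - 1), diffs[k]'(by rw [hdl]; omega) =
        series[k+1]'(by omega) - series[k]'(by omega) := by
      intro k hk
      simp only [hdiffs, Int.toNat_one, List.getElem_map, List.getElem_zip, List.getElem_drop]
      congr 2
      omega
    rw [show ((n : Int) - 1) = 1 + ((n - 2 : Nat) : Int) by push_cast; omega]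
    apply List.ext_getElem?
    intro j
    rw [foldl_stepA_getElem? series (n-2) 1 _ j (le_refl 1)]
    have hs0 : PySem.List.pyGetD series 0 0 = series[0]'(by omega) := by
      rw [PySem.List.pyGetD_eq_getElem series 0 (by norm_num) (by push_cast; omega)]
      congr 1
    have hsl : PySem.List.pyGetD series (-1) 0 = series[n-1]'(by omega) := by
      rw [PySem.List.pyGetD_neg_ofNat series 1 0 (by norm_num) (by omega)]
    have hlenpk : (((List.replicate n (none : Option Int)).set 0 (some (PySem.List.pyGetD series 0 0))).set (n - 1)
        (some (PySem.List.pyGetD series (-1) 0))).length = n := by simp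
    rw [hlenpk]
    have hpk0 : (((List.replicate n (none : Option Int)).set 0 (some (PySem.List.pyGetD series 0 0))).set (n - 1)
        (some (PySem.List.pyGetD series (-1) 0)))[j]? =
        if j = n - 1 then some (some (PySem.List.pyGetD series (-1) 0))
        else if j = 0 then some (some (PySem.List.pyGetD series 0 0))
        else if j < n then some none else none := by
      rw [List.getElem?_set, List.getElem?_set, List.getElem?_replicate]
      simp only [List.length_set, List.length_replicate]
      split_ifs <;> first | rfl | omega
    rw [hpk0]
    have hmid : (((diffs.zip (diffs.drop 1)).zip (series.drop 1)).map
        (fun p => if p.1.1 > 0 ∧ 0 > p.1.2 then some p.2 else none)).length = n - 2 := by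
      simp [hdl]; omega
    rcases Nat.eq_zero_or_pos j with hj0 | hj1
    · subst hj0
      rw [if_neg (by rintro ⟨h, -⟩; omega)]
      simp [show ¬ (0 = n - 1) by omega]
    · obtain ⟨k, rfl⟩ : ∃ k, j = k + 1 := ⟨j - 1, by omega⟩
      simp only [List.cons_append, List.nil_append]
      rw [List.getElem?_cons_succ]
      by_cases hk : k < n - 2
      · -- interior index
        rw [List.getElem?_append_left (by rw [hmid]; omega)]
        have e1 : PySem.List.pyGetD series ((k+1 : Nat) : Int) 0 = series[k+1]'(by omega) := by
          rw [PySem.List.pyGetD_eq_getElem series 0 (by positivity) (by push_cast; omega)]; simp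
        have e2 : PySem.List.pyGetD series (((k+1 : Nat) : Int) - 1) 0 = series[k]'(by omega) := by
          rw [show ((k+1 : Nat) : Int) - 1 = ((k : Nat) : Int) by push_cast; ring,
              PySem.List.pyGetD_eq_getElem series 0 (by positivity) (by push_cast; omega)]
          congr 1 <;> omega
        have e3 : PySem.List.pyGetD series (((k+1 : Nat) : Int) + 1) 0 = series[k+2]'(by omega) := by
          rw [show ((k+1 : Nat) : Int) + 1 = ((k+2 : Nat) : Int) by push_cast; ring,
              PySem.List.pyGetD_eq_getElem series 0 (by positivity) (by push_cast; omega)]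
          congr 1 <;> omega
        rw [List.getElem?_eq_getElem (by rw [hmid]; omega), List.getElem_map]
        have ez : (((diffs.zip (diffs.drop 1)).zip (series.drop 1)))[k]'(by simp [hdl]; omega) =
            ((diffs[k]'(by rw [hdl]; omega), diffs[k+1]'(by rw [hdl]; omega)), series[k+1]'(by omega)) := by
          rw [List.getElem_zip, List.getElem_zip, List.getElem_drop, List.getElem_drop]
          simp only [show 1 + k = k + 1 by omega]
        rw [ez, hde k (by omega), hde (k+1) (by omega)]
        have hiff : (1 ≤ ((k+1 : Nat) : Int) ∧ ((k+1 : Nat) : Int) < 1 + ((n - 2 : Nat) : Int) ∧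
              PySem.List.pyGetD series ((k+1 : Nat) : Int) 0 > PySem.List.pyGetD series (((k+1 : Nat) : Int) - 1) 0 ∧
              PySem.List.pyGetD series ((k+1 : Nat) : Int) 0 > PySem.List.pyGetD series (((k+1 : Nat) : Int) + 1) 0) ↔
              (series[k+1]'(by omega) - series[k]'(by omega) > 0 ∧
               0 > series[k+2]'(by omega) - series[k+1]'(by omega)) := by
          rw [e1, e2, e3]
          constructor
          · rintro ⟨-, -, hc1, hc2⟩; exact ⟨by omega, by omega⟩
          · rintro ⟨hc1, hc2⟩; exact ⟨by push_cast; omega, by push_cast; omega, by omega, by omega⟩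
        rw [if_congr hiff rfl rfl]
        split_ifs <;> first | rfl | rw [e1] | omega | simp_all
      · -- k ≥ n - 2 : last element or out of range
        rw [List.getElem?_append_right (by rw [hmid]; omega), hmid]
        rw [if_neg (by rintro ⟨-, hb, -⟩; push_cast at hb; omega)]
        by_cases hlast : k + 1 = n - 1
        · rw [if_pos hlast]
          have : k - (n - 2) = 0 := by omega
          rw [this]; rfl
        · rw [if_neg hlast, if_neg (by omega), if_neg (by omega)]
          have : 1 ≤ k - (n - 2) := by omega
          rw [List.getElem?_eq_none (by simp; omega)]

-- ===== VERDICT (by name: the statement is the Claim_ definition above) =====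
theorem peaks_labeler_spec : Claim_equal_peaks_labeler := by
  intro series _ hpre
  unfold Spec_peaks_labeler
  exact peaks_labeler_eq_alt series hpre
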